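-- pv_equiv track=rewrite | github.com/Ziache/AoC-2020 | Day10/Day10-2.py | nbalter
-- ===== SOURCE A (Python) =====
-- def tribo(n):
--     # aux function that computes the 'tribonacci' sequence :
--     #
--     # tribo(0) = 1
--     # tribo(1) = 1
--     # tribo(2) = 2
--     # tribo(n) = tribo(n-1) + tribo(n-2) + tribo(n-3), n > 2
--
--     if n < 2:
--         return 1
--     elif n == 2:
--         return 2
--     else:
--         return tribo(n-1) + tribo(n-2) + tribo(n-3)
--
-- def nbalter(lines):
--     # finds the number of alternatives, by following this rule :
--     #
--     # the number of alternatives rely on steps where there are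
--     # 2 or more contiguous differences of one.
--     #
--     # More precisely, in a sub-sequence of n ones,
--     # the number of alternatives is tribo(n), with tribo defined line 1.
--     #
--     # So, we only have to compute tribo(n) to the sequences of ones,
--     # and then multiply them all.
--     #
--     # This one was tough haha
--
--     # initial number of alternatives
--     alt = 1
--
--     # first we add the first and the last output
--     lines.insert(0, 0)
--     l = len(lines)
--     lines.append(lines[-1] + 3)
--
--     # list of differences
--     diffs = [lines[i+1] - lines[i] for i in range(l)]
--
--     # number of consecutive ones
--     nb1 = 0
--     for i in diffs:
--         if i == 1:
--             nb1 += 1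
--         else:
--             alt *= tribo(nb1)
--             nb1 = 0
--
--     return alt
-- ===== SOURCE B (Python) =====
-- def nbalter(lines):
--     # Single pass over consecutive differences with an iterative three-register
--     # tribonacci instead of the triple-recursive one.
--     # Note: unlike the original, this does not mutate `lines` in place.
--     def trib(n):
--         a, b, c = 1, 1, 2
--         for _ in range(n):
--             a, b, c = b, c, a + b + c
--         return a
--
--     last = lines[-1] if lines else 0
--     alt = 1
--     prev = 0
--     run = 0
--     for x in lines + [last + 3]:
--         if x - prev == 1:
--             run += 1
--         else:
--             alt *= trib(run)
--             run = 0
--         prev = x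
--     return alt
-- ===== Notes on version B (the rewrite author's own statement) =====
-- stated objective: alternative
-- what changed: B replaces the naive triple-recursive tribonacci and the materialised index-based diff list by a single pass over the elements carrying (previous value, run length) with an iterative three-register tribonacci.
import Mathlib
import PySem

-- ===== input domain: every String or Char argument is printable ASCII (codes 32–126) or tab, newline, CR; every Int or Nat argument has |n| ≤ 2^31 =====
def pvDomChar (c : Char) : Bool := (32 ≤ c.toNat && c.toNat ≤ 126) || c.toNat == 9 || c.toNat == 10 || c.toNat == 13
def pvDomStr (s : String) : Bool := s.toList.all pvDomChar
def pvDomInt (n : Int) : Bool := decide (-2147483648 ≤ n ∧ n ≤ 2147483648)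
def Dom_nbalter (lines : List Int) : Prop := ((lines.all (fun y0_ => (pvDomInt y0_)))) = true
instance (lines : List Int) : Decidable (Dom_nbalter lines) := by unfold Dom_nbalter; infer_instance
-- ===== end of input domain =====

-- B replaces A's triple-recursive tribonacci and materialised index-based diff list by one pass
-- carrying (previous element, run length) with an iterative three-register tribonacci (objective: alternative).
-- A mutates its argument in place (insert/append); the equivalence proved is about the RETURN value only.

-- ===== PORT A =====
def tribo (n : Int) : Int :=
  if n < 2 then 1
  else if n = 2 then 2
  else tribo (n-1) + tribo (n-2) + tribo (n-3)
termination_by n.toNat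
decreasing_by all_goals omega

def nbalter (lines : List Int) : Int :=
  let lines1 : List Int := 0 :: lines                                   -- lines.insert(0, 0)
  let l : Int := (lines1.length : Int)                                  -- l = len(lines)
  let lines2 : List Int := lines1 ++ [PySem.List.pyGetD lines1 (-1) 0 + 3]  -- lines.append(lines[-1] + 3)
  let diffs : List Int := (PySem.List.pyRange 0 l 1).map
      (fun i => PySem.List.pyGetD lines2 (i + 1) 0 - PySem.List.pyGetD lines2 i 0)
  let res := diffs.foldl
      (fun (s : Int × Int) i => if i == 1 then (s.1, s.2 + 1) else (s.1 * tribo s.2, 0)) (1, 0)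
  res.1

-- ===== PORT B =====
def tribIter (n : Int) : Int :=
  ((PySem.List.pyRange 0 n 1).foldl
      (fun (t : Int × Int × Int) _ => (t.2.1, t.2.2, t.1 + t.2.1 + t.2.2)) (1, 1, 2)).1

def nbalter_alt (lines : List Int) : Int :=
  let last : Int := match lines.getLast? with | some v => v | none => 0
  let res := (lines ++ [last + 3]).foldl
      (fun (s : Int × Int × Int) x =>
        if x - s.2.1 == 1 then (s.1, x, s.2.2 + 1)
        else (s.1 * tribIter s.2.2, x, 0)) (1, 0, 0)
  res.1

-- ===== PRECONDITION & SPEC =====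
def Spec_nbalter (lines : List Int) (out : Int) : Prop := out = nbalter_alt lines
instance (lines : List Int) (out : Int) : Decidable (Spec_nbalter lines out) := by unfold Spec_nbalter; infer_instance

-- ===== CLAIM (what is proved, stated in full; the proofs are below) =====
def Claim_equal_nbalter : Prop := ∀ (lines : List Int), Dom_nbalter lines → Spec_nbalter lines (nbalter lines)

-- ===== LEMMAS AND PROOFS =====

-- the list of consecutive differences of p :: xs
def diffsOf (p : Int) : List Int → List Int
  | [] => []
  | x :: xs => (x - p) :: diffsOf x xs

theorem pyGetD_cons_succ_nat (x : Int) (xs : List Int) (k : Nat) (d : Int) :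
    PySem.List.pyGetD (x :: xs) ((k : Int) + 1) d = PySem.List.pyGetD xs (k : Int) d := by
  rw [show ((k : Int) + 1) = (((k + 1 : Nat) : Int)) by push_cast; ring]
  rw [PySem.List.pyGetD_natCast, PySem.List.pyGetD_natCast, List.getD_cons_succ]

theorem tribo_nonneg_rec (k : Nat) :
    tribo ((k : Int) + 3) = tribo k + tribo ((k : Int) + 1) + tribo ((k : Int) + 2) := by
  rw [tribo]
  have h1 : ¬ ((k : Int) + 3 < 2) := by omega
  have h2 : ¬ ((k : Int) + 3 = 2) := by omega
  simp only [h1, h2, if_false]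
  ring_nf

theorem tribIter_fold (k : Nat) :
    (PySem.List.pyRange 0 (k : Int) 1).foldl
        (fun (t : Int × Int × Int) _ => (t.2.1, t.2.2, t.1 + t.2.1 + t.2.2)) (1, 1, 2)
      = (tribo k, tribo ((k : Int) + 1), tribo ((k : Int) + 2)) := by
  induction k with
  | zero =>
      have t0 : tribo ((0 : Nat) : Int) = 1 := by rw [tribo]; norm_num
      have t1 : tribo (((0 : Nat) : Int) + 1) = 1 := by rw [tribo]; norm_num
      have t2 : tribo (((0 : Nat) : Int) + 2) = 2 := by rw [tribo]; norm_num
      rw [PySem.List.pyRange_one_eq_nil (by norm_num), List.foldl_nil, t0, t1, t2]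
  | succ n ih =>
      have hsplit : PySem.List.pyRange 0 ((n : Int) + 1) 1
          = PySem.List.pyRange 0 (n : Int) 1 ++ [(n : Int)] :=
        PySem.List.pyRange_one_succ_right (by omega)
      have hc : ((n + 1 : Nat) : Int) = (n : Int) + 1 := by push_cast; ring
      rw [hc, hsplit, List.foldl_append, ih]
      simp only [List.foldl_cons, List.foldl_nil, Prod.mk.injEq]
      have e1 : (n : Int) + 1 + 1 = (n : Int) + 2 := by ring
      have e2 : (n : Int) + 1 + 2 = (n : Int) + 3 := by ring
      rw [e1, e2, tribo_nonneg_rec n]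
      all_goals trivial

theorem tribIter_eq_tribo (n : Int) : tribIter n = tribo n := by
  by_cases h : n < 0
  · unfold tribIter
    rw [PySem.List.pyRange_one_eq_nil (by omega)]
    rw [tribo]
    simp [show n < 2 by omega]
  · have hn : n = ((n.toNat : Nat) : Int) := by omega
    unfold tribIter
    rw [hn, tribIter_fold]

-- A's index-based diff comprehension computes the consecutive differences of p :: xs
theorem map_range_diff (xs : List Int) (p : Int) :
    (List.range xs.length).map
        (fun k : Nat => PySem.List.pyGetD (p :: xs) ((k : Int) + 1) 0
                  - PySem.List.pyGetD (p :: xs) ((k : Int)) 0)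
      = diffsOf p xs := by
  induction xs generalizing p with
  | nil => simp [diffsOf]
  | cons y ys ih =>
      rw [List.length_cons, List.range_succ_eq_map, List.map_cons, List.map_map, diffsOf]
      congr 1
      · rw [pyGetD_cons_succ_nat]
        simp
      · rw [← ih y]
        apply List.map_congr_left
        intro k _
        simp only [Function.comp_apply]
        have h1 : ((k.succ : Nat) : Int) = ((k + 1 : Nat) : Int) := rfl
        rw [h1, show (((k + 1 : Nat) : Int) + 1) = (((k + 1 : Nat) : Int) + 1) from rfl]
        rw [pyGetD_cons_succ_nat p (y :: ys) (k + 1) 0]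
        rw [show (((k + 1 : Nat) : Int)) = ((k : Int) + 1) by push_cast; ring]
        rw [pyGetD_cons_succ_nat p (y :: ys) k 0, pyGetD_cons_succ_nat y ys k 0]

-- A's loop over the diff list equals B's one-pass loop carrying the previous element
theorem fold_corr (t : Int → Int) (xs : List Int) :
    ∀ (alt p run : Int),
      ((xs.foldl (fun (s : Int × Int × Int) x =>
            if x - s.2.1 == 1 then (s.1, x, s.2.2 + 1)
            else (s.1 * t s.2.2, x, 0)) (alt, p, run)).1,
       (xs.foldl (fun (s : Int × Int × Int) x =>
            if x - s.2.1 == 1 then (s.1, x, s.2.2 + 1)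
            else (s.1 * t s.2.2, x, 0)) (alt, p, run)).2.2)
      = (diffsOf p xs).foldl
          (fun (s : Int × Int) i => if i == 1 then (s.1, s.2 + 1) else (s.1 * t s.2, 0))
          (alt, run) := by
  induction xs with
  | nil => intro alt p run; simp [diffsOf]
  | cons y ys ih =>
      intro alt p run
      rw [diffsOf]
      simp only [List.foldl_cons]
      by_cases h : y - p == 1
      · simp only [h, if_true]; exact ih alt y (run + 1)
      · simp only [h, Bool.false_eq_true, if_false]; exact ih (alt * t run) y 0

theorem last_eq (lines : List Int) :
    PySem.List.pyGetD (0 :: lines) (-1) 0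
      = (match lines.getLast? with | some v => v | none => 0) := by
  rcases List.eq_nil_or_concat lines with h | ⟨ys, y, h⟩
  · subst h; decide
  · subst h
    rw [List.concat_eq_append]
    rw [show (0 : Int) :: (ys ++ [y]) = (0 :: ys) ++ [y] by simp]
    rw [PySem.List.pyGetD_neg_one_append_singleton]
    simp

-- ===== VERDICT (by name: the statement is the Claim_ definition above) =====
theorem nbalter_spec : Claim_equal_nbalter := by
  intro lines _
  unfold Spec_nbalter
  simp only [nbalter, nbalter_alt]
  rw [last_eq]
  set last : Int := (match lines.getLast? with | some v => v | none => 0) with hlast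
  rw [show (0 : Int) :: lines ++ [last + 3] = 0 :: (lines ++ [last + 3]) by simp]
  rw [show ((((0 : Int) :: lines).length : Nat) : Int)
        = (((lines ++ [last + 3]).length : Nat) : Int) by simp]
  rw [PySem.List.pyRange_zero_natCast]
  rw [List.map_map]
  simp only [Function.comp_def]
  rw [map_range_diff]
  rw [← fold_corr tribo (lines ++ [last + 3]) 1 0 0]
  have hfun :
      (fun (s : Int × Int × Int) x =>
        if x - s.2.1 == 1 then (s.1, x, s.2.2 + 1)
        else (s.1 * tribIter s.2.2, x, 0))
      = (fun (s : Int × Int × Int) x =>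
        if x - s.2.1 == 1 then (s.1, x, s.2.2 + 1)
        else (s.1 * tribo s.2.2, x, 0)) := by
    funext s x
    rw [tribIter_eq_tribo]
  rw [hfun]
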